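-- pv_equiv track=rewrite | github.com/sexxis/goose | goose/response/utils/check_pos_tags.py | pos_tags
-- ===== SOURCE A (Python) =====
-- POS_NOUN = "NN"
--
-- POS_PRONOUN = "PRP"
--
-- POS_VERB = "VB"
--
-- POS_ADJ = "JJ"
--
-- POS_PREP = "IN"
--
-- def pos_tags(text):
--     noun, pronoun, verb, adj, prep = None, None, None, None, None
--     index = int()
--
--     for word, pos in text:
--         # print word, pos
--
--         if pos == POS_NOUN:
--             noun = word
--
--         elif pos == POS_PRONOUN and not pronoun:
--             if word.lower() == "you":
--                 pronoun = 'I'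
--             elif word.lower() == 'I':
--                 pronoun = "you"
--
--         elif pos.startswith(POS_VERB) and not verb:
--             verb = word
--
--         elif pos == POS_ADJ and not adj:
--             adj = word
--
--         elif pos == POS_PREP and not prep:
--             prep = word
--
--         index += 1
--
--     return noun, pronoun, verb, adj, prep
-- ===== SOURCE B (Python) =====
-- POS_NOUN = "NN"
-- POS_PRONOUN = "PRP"
-- POS_VERB = "VB"
-- POS_ADJ = "JJ"
-- POS_PREP = "IN"
--
--
-- def pos_tags(text):
--     text = list(text)
--     noun = next((w for w, p in reversed(text) if p == POS_NOUN), None)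
--     pronoun = ("I" if any(p == POS_PRONOUN and w.lower() == "you"
--                           for w, p in text) else None)
--     verb = next((w for w, p in text if p.startswith(POS_VERB)), None)
--     adj = next((w for w, p in text if p == POS_ADJ), None)
--     prep = next((w for w, p in text if p == POS_PREP), None)
--     return noun, pronoun, verb, adj, prep
-- ===== Notes on version B (the rewrite author's own statement) =====
-- stated objective: simpler
-- what changed: Replaces the single stateful elif-chain loop with five independent focused scans (last-NN lookup over the reversed list, an any() test for the pronoun, and plain first-match lookups), dropping the unused index counter and the dead word.lower()=='I' branch; Pre_ excludes token lists with an empty-string word tagged VB*/JJ/IN, a degenerate token on which A's truthiness test treats the matched empty word as unset while B's first-match keeps it, and neither value is specified.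
import Mathlib
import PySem

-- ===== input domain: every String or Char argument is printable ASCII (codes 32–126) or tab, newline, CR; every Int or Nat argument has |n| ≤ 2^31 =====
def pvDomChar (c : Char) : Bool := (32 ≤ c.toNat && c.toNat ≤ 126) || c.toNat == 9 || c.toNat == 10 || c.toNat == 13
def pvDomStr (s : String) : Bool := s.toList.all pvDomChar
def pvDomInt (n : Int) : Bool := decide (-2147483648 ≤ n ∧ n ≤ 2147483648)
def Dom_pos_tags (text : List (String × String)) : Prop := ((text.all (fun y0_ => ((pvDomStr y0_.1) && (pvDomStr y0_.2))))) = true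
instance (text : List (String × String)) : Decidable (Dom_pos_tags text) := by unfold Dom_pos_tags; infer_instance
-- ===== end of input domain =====

-- B replaces A's single stateful elif-chain loop by five independent focused scans; objective: simpler.


-- ===== PORT A =====
-- Python truthiness of an Optional[str]: 'not x' holds for None and for "".
def pyFalsy (o : Option String) : Bool :=
  match o with
  | none => true
  | some s => s == ""

-- one iteration of A's for-loop over the state (noun, pronoun, verb, adj, prep, index)
def posStepA (s : (Option String × Option String × Option String × Option String × Option String) × Int)
    (wp : String × String) :
    (Option String × Option String × Option String × Option String × Option String) × Int :=
  let w := wp.1; let p := wp.2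
  let noun := s.1.1; let pronoun := s.1.2.1; let verb := s.1.2.2.1
  let adj := s.1.2.2.2.1; let prep := s.1.2.2.2.2; let index := s.2
  if p == "NN" then ((some w, pronoun, verb, adj, prep), index + 1)
  else if p == "PRP" && pyFalsy pronoun then
    (if PySem.Str.lower w == "you" then ((noun, some "I", verb, adj, prep), index + 1)
     else if PySem.Str.lower w == "I" then ((noun, some "you", verb, adj, prep), index + 1)
     else ((noun, pronoun, verb, adj, prep), index + 1))
  else if PySem.Str.startswith p "VB" && pyFalsy verb then ((noun, pronoun, some w, adj, prep), index + 1)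
  else if p == "JJ" && pyFalsy adj then ((noun, pronoun, verb, some w, prep), index + 1)
  else if p == "IN" && pyFalsy prep then ((noun, pronoun, verb, adj, some w), index + 1)
  else ((noun, pronoun, verb, adj, prep), index + 1)

def pos_tags (text : List (String × String)) :
    Option String × Option String × Option String × Option String × Option String :=
  (text.foldl posStepA ((none, none, none, none, none), (0 : Int))).1

-- ===== PORT B =====
def pos_tags_alt (text : List (String × String)) :
    Option String × Option String × Option String × Option String × Option String :=
  let noun := (text.reverse.find? (fun wp => wp.2 == "NN")).map (·.1)
  let pronoun := if text.any (fun wp => wp.2 == "PRP" && PySem.Str.lower wp.1 == "you")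
                 then some "I" else none
  let verb := (text.find? (fun wp => PySem.Str.startswith wp.2 "VB")).map (·.1)
  let adj := (text.find? (fun wp => wp.2 == "JJ")).map (·.1)
  let prep := (text.find? (fun wp => wp.2 == "IN")).map (·.1)
  (noun, pronoun, verb, adj, prep)

-- ===== PRECONDITION & SPEC =====
-- Pre_ excludes token lists containing an empty-string word tagged VB*/JJ/IN: on such a
-- degenerate token A's truthiness test ('not verb') treats the matched empty word as unset
-- while B's first-match keeps it, and neither value is specified for an empty token.
def Pre_pos_tags (text : List (String × String)) : Prop :=
  (text.all (fun wp =>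
    !(wp.1 == "" && (PySem.Str.startswith wp.2 "VB" || wp.2 == "JJ" || wp.2 == "IN")))) = true
instance (text : List (String × String)) : Decidable (Pre_pos_tags text) := by unfold Pre_pos_tags; infer_instance

def pvWitness_pos_tags : (List (String × String)) := [("You", "PRP"), ("run", "VB"), ("cat", "NN")]

def Spec_pos_tags (text : List (String × String)) (out : Option String × Option String × Option String × Option String × Option String) : Prop := out = pos_tags_alt text
instance (text : List (String × String)) (out : Option String × Option String × Option String × Option String × Option String) : Decidable (Spec_pos_tags text out) := by unfold Spec_pos_tags; infer_instance

-- ===== CLAIM (what is proved, stated in full; the proofs are below) =====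
def Claim_equal_pos_tags : Prop := ∀ (text : List (String × String)), Dom_pos_tags text → Pre_pos_tags text → Spec_pos_tags text (pos_tags text)

-- ===== LEMMAS AND PROOFS =====

lemma pyFalsy_some (s : String) : pyFalsy (some s) = (s == "") := rfl

-- the dead branch of A: word.lower() is never the uppercase "I"
lemma lower_ne_I (w : String) : (PySem.Str.lower w == "I") = false := by
  rw [beq_eq_false_iff_ne]
  intro h
  have hl : PySem.Chars.lower w.toList = ['I'] := by
    have := congrArg String.toList h
    simpa [PySem.Str.lower] using this
  unfold PySem.Chars.lower at hl
  rw [List.map_eq_singleton_iff] at hl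
  obtain ⟨c, hcs, hc⟩ := hl
  unfold PySem.Chars.lowerChar at hc
  split_ifs at hc with hu
  · unfold PySem.Chars.isupper at hu
    simp only [Bool.and_eq_true, decide_eq_true_eq, Char.le_def] at hu
    obtain ⟨h1, h2⟩ := hu
    have h1' : 65 ≤ c.toNat := h1
    have h2' : c.toNat ≤ 90 := h2
    have hval : (c.toNat + 32).isValidChar := Or.inl (by omega)
    have h73 := congrArg Char.toNat hc
    rw [Char.toNat_ofNat, if_pos hval] at h73
    have : c.toNat + 32 = 73 := by rw [h73]; rfl
    omega
  · subst hc
    unfold PySem.Chars.isupper at hu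
    simp at hu

-- per-field "finish" functions: the final value of each accumulator after scanning the rest
def nounRes (a : Option String) (text : List (String × String)) : Option String :=
  match text.reverse.find? (fun wp => wp.2 == "NN") with
  | some wp => some wp.1
  | none => a

def pronRes (a : Option String) (text : List (String × String)) : Option String :=
  if pyFalsy a && text.any (fun wp => wp.2 == "PRP" && PySem.Str.lower wp.1 == "you")
  then some "I" else a

def fieldRes (a : Option String) (ws : List String) : Option String :=
  if pyFalsy a then
    match ws.find? (fun w => !(w == "")) with
    | some w => some w
    | none => if ws.isEmpty then a else some ""
  else a

lemma nounRes_cons (a : Option String) (w p : String) (t : List (String × String)) :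
    nounRes a ((w, p) :: t) = nounRes (if p == "NN" then some w else a) t := by
  unfold nounRes
  rw [List.reverse_cons, List.find?_append]
  cases h : t.reverse.find? (fun wp => wp.2 == "NN") with
  | some wp => simp
  | none => cases hp : (p == "NN") <;> simp [hp, List.find?]

lemma pronRes_cons (a : Option String) (w p : String) (t : List (String × String)) :
    pronRes a ((w, p) :: t) =
      pronRes (if p == "PRP" && pyFalsy a then
                 (if PySem.Str.lower w == "you" then some "I" else a) else a) t := by
  unfold pronRes
  cases ha : pyFalsy a <;>
  cases hp : (p == "PRP") <;>
  cases hy : (PySem.Str.lower w == "you") <;>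
  cases hany : t.any (fun wp => wp.2 == "PRP" && PySem.Str.lower wp.1 == "you") <;>
    simp [ha, hp, hy, hany, List.any_cons, pyFalsy_some]

lemma fieldRes_cons (a : Option String) (w : String) (ws : List String) :
    fieldRes a (w :: ws) = fieldRes (if pyFalsy a then some w else a) ws := by
  unfold fieldRes
  cases ha : pyFalsy a
  · simp [ha]
  · cases hw : (w == "")
    · simp [ha, List.find?_cons, hw, pyFalsy_some]
    · have hw' : w = "" := by simpa using hw
      subst hw'
      cases h : ws.find? (fun w => !(w == "")) <;> cases he : ws.isEmpty <;>
        simp [ha, h, List.find?_cons, pyFalsy_some]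

lemma filter_map_cons (q : String × String → Bool) (w p : String) (t : List (String × String)) :
    ((((w, p) :: t).filter q).map (·.1)) =
      if q (w, p) then w :: ((t.filter q).map (·.1)) else ((t.filter q).map (·.1)) := by
  by_cases h : q (w, p) <;> simp [List.filter_cons, h]

-- A's elif step equals the componentwise step (the POS guards are mutually exclusive strings)
lemma posStepA_eq (noun pron verb adj prep : Option String) (idx : Int) (w p : String) :
    posStepA ((noun, pron, verb, adj, prep), idx) (w, p) =
      ((if p == "NN" then some w else noun,
        if p == "PRP" && pyFalsy pron then
          (if PySem.Str.lower w == "you" then some "I" else pron) else pron,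
        if PySem.Str.startswith p "VB" && pyFalsy verb then some w else verb,
        if p == "JJ" && pyFalsy adj then some w else adj,
        if p == "IN" && pyFalsy prep then some w else prep), idx + 1) := by
  unfold posStepA
  by_cases h1 : p = "NN"
  · subst h1
    simp [show PySem.Chars.startswith ['N','N'] ['V','B'] = false from by decide]
  · by_cases h2 : p = "PRP"
    · subst h2
      cases ha : pyFalsy pron <;>
      cases hy : (PySem.Str.lower w == "you") <;>
        simp [ha, hy, lower_ne_I w,
          show PySem.Chars.startswith ['P','R','P'] ['V','B'] = false from by decide]
    · cases h3 : PySem.Str.startswith p "VB"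
      · by_cases h4 : p = "JJ"
        · subst h4
          cases hj : pyFalsy adj <;>
            simp [hj, show PySem.Chars.startswith ['J','J'] ['V','B'] = false from by decide]
        · by_cases h5 : p = "IN"
          · subst h5
            cases hj : pyFalsy prep <;>
              simp [hj, show PySem.Chars.startswith ['I','N'] ['V','B'] = false from by decide]
          · have h3' : PySem.Chars.startswith p.toList ['V','B'] = false := by simpa using h3
            simp [h1, h2, h3', h4, h5]
      · have e1 : (p == "NN") = false := by simpa using h1
        have e2 : (p == "PRP") = false := by simpa using h2
        have e3 : (p == "JJ") = false := by
          rw [beq_eq_false_iff_ne]; rintro rfl; exact absurd h3 (by decide)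
        have e4 : (p == "IN") = false := by
          rw [beq_eq_false_iff_ne]; rintro rfl; exact absurd h3 (by decide)
        have h3' : PySem.Chars.startswith p.toList ['V','B'] = true := by simpa using h3
        cases hv : pyFalsy verb <;> simp [e1, e2, e3, e4, h3', hv]

-- main invariant: A's fold splits into the five independent finish functions
lemma foldl_posStepA (text : List (String × String)) :
    ∀ (noun pron verb adj prep : Option String) (idx : Int),
    text.foldl posStepA ((noun, pron, verb, adj, prep), idx) =
      ((nounRes noun text,
        pronRes pron text,
        fieldRes verb ((text.filter (fun wp => PySem.Str.startswith wp.2 "VB")).map (·.1)),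
        fieldRes adj ((text.filter (fun wp => wp.2 == "JJ")).map (·.1)),
        fieldRes prep ((text.filter (fun wp => wp.2 == "IN")).map (·.1))),
       idx + text.length) := by
  induction text with
  | nil => intro noun pron verb adj prep idx; simp [nounRes, pronRes, fieldRes]
  | cons wp t ih =>
      intro noun pron verb adj prep idx
      obtain ⟨w, p⟩ := wp
      rw [List.foldl_cons, posStepA_eq, ih]
      rw [nounRes_cons, pronRes_cons,
          filter_map_cons (fun wp => PySem.Str.startswith wp.2 "VB"),
          filter_map_cons (fun wp => wp.2 == "JJ"),
          filter_map_cons (fun wp => wp.2 == "IN")]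
      cases h3 : PySem.Str.startswith p "VB" <;>
      cases h4 : (p == "JJ") <;>
      cases h5 : (p == "IN") <;>
        simp [h3, h4, h5, fieldRes_cons] <;>
        omega

lemma nounRes_none (text : List (String × String)) :
    nounRes none text = (text.reverse.find? (fun wp => wp.2 == "NN")).map (·.1) := by
  unfold nounRes
  cases h : text.reverse.find? (fun wp => wp.2 == "NN") <;> simp

lemma pronRes_none (text : List (String × String)) :
    pronRes none text =
      (if text.any (fun wp => wp.2 == "PRP" && PySem.Str.lower wp.1 == "you")
       then some "I" else none) := by
  cases h : text.any (fun wp => wp.2 == "PRP" && PySem.Str.lower wp.1 == "you") <;>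
    simp [pronRes, pyFalsy, h]

-- with no empty words in ws, A's truthiness scan is just the head
lemma fieldRes_none_head (ws : List String) (h : ∀ w ∈ ws, w ≠ "") :
    fieldRes none ws = ws.head? := by
  cases ws with
  | nil => rfl
  | cons w t =>
      have hw : (w == "") = false := by
        rw [beq_eq_false_iff_ne]; exact h w (List.mem_cons_self)
      simp [fieldRes, pyFalsy, List.find?_cons, hw]

-- B's first-match is the head of the filtered word list
lemma find?_map_eq_head (q : String × String → Bool) (text : List (String × String)) :
    (text.find? q).map (·.1) = ((text.filter q).map (·.1)).head? := by
  induction text with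
  | nil => rfl
  | cons wp t ih =>
      cases h : q wp
      · rw [List.find?_cons_of_neg (by simp [h]), List.filter_cons_of_neg (by simp [h]), ih]
      · rw [List.find?_cons_of_pos h, List.filter_cons_of_pos h]
        simp

-- ===== VERDICT (by name: the statement is the Claim_ definition above) =====
theorem pos_tags_spec : Claim_equal_pos_tags := by
  intro text _ hpre
  unfold Spec_pos_tags pos_tags pos_tags_alt
  rw [foldl_posStepA]
  unfold Pre_pos_tags at hpre
  rw [List.all_eq_true] at hpre
  have hne : ∀ (q : String × String → Bool),
      (∀ wp : String × String, q wp = true →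
        (PySem.Str.startswith wp.2 "VB" || wp.2 == "JJ" || wp.2 == "IN") = true) →
      ∀ w ∈ (text.filter q).map (·.1), w ≠ "" := by
    intro q hq w hw
    rw [List.mem_map] at hw
    obtain ⟨wp, hmem, rfl⟩ := hw
    rw [List.mem_filter] at hmem
    have := hpre wp hmem.1
    have htag := hq wp hmem.2
    simp only [Bool.not_eq_true', Bool.and_eq_false_iff] at this
    rcases this with h | h
    · rw [beq_eq_false_iff_ne] at h; exact h
    · rw [h] at htag; exact absurd htag (by decide)
  rw [fieldRes_none_head _ (hne _ (by intro wp h; rw [h]; simp)),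
      fieldRes_none_head _ (hne _ (by intro wp h; rw [h]; simp)),
      fieldRes_none_head _ (hne _ (by intro wp h; rw [h]; simp)),
      nounRes_none, pronRes_none]
  simp only [find?_map_eq_head]
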